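-- pv_equiv track=rewrite | github.com/caja-matematica/NLPFinance | Experiment3NegFin.py | get_ranks
-- ===== SOURCE A (Python) =====
-- def get_ranks(vals):
--     sorted_vals = sorted(vals)
--     ranks = []
--     for val in vals:
--         for i in range(len(vals)):
--             if val == sorted_vals[i]:
--                 ranks.append(i)
--                 break
--     return ranks
-- ===== SOURCE B (Python) =====
-- def get_ranks(vals):
--     ranks = []
--     for val in vals:
--         c = 0
--         for w in vals:
--             if w < val:
--                 c += 1
--         ranks.append(c)
--     return ranks
-- ===== Notes on version B (the rewrite author's own statement) =====
-- stated objective: alternative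
-- what changed: Drops the sort entirely: each rank is computed directly as the count of strictly smaller elements, which equals the first index of the value in the sorted list.
import Mathlib
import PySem

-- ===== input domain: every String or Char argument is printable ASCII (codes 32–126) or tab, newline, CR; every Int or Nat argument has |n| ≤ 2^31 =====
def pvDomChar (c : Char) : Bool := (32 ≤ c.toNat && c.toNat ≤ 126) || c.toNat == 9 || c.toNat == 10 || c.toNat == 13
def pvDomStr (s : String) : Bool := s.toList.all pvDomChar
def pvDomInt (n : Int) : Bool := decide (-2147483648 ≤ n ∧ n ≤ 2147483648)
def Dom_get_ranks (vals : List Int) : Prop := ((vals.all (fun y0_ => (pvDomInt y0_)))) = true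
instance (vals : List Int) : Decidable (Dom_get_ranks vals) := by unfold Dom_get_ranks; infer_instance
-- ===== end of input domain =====

-- B drops the sort entirely: each rank is the count of strictly smaller elements (same O(n^2) cost, different algorithm).


-- ===== PORT A =====
-- inner 'for i in range(len(vals)): if val == sorted_vals[i]: ranks.append(i); break'
def aFind (val : Int) (sorted_vals : List Int) (ranks : List Int) : List Int → List Int
  | [] => ranks
  | i :: rest =>
      if PySem.List.pyGet? sorted_vals i = some val then ranks ++ [i]
      else aFind val sorted_vals ranks rest

def get_ranks (vals : List Int) : List Int :=
  let sorted_vals := PySem.List.sorted vals (fun x => x) false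
  vals.foldl (fun ranks val => aFind val sorted_vals ranks (PySem.List.pyRange 0 vals.length 1)) []

-- ===== PORT B =====
-- inner 'c = 0; for w in vals: if w < val: c += 1' as a fold, outer loop appends c
def get_ranks_alt (vals : List Int) : List Int :=
  vals.foldl
    (fun ranks val =>
      ranks ++ [vals.foldl (fun c w => if w < val then c + 1 else c) (0 : Int)])
    []

-- ===== PRECONDITION & SPEC =====
def Spec_get_ranks (vals : List Int) (out : List Int) : Prop := out = get_ranks_alt vals
instance (vals : List Int) (out : List Int) : Decidable (Spec_get_ranks vals out) := by unfold Spec_get_ranks; infer_instance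

-- ===== CLAIM (what is proved, stated in full; the proofs are below) =====
def Claim_equal_get_ranks : Prop := ∀ (vals : List Int), Dom_get_ranks vals → Spec_get_ranks vals (get_ranks vals)

-- ===== LEMMAS AND PROOFS =====

theorem aFind_acc (val : Int) (s ranks is : List Int) :
    aFind val s ranks is = ranks ++ aFind val s [] is := by
  induction is generalizing ranks with
  | nil => simp [aFind]
  | cons i rest ih =>
      simp only [aFind]
      split
      · simp
      · rw [ih ranks, ih []]

-- shifting every index by one steps into the tail of the scanned list
theorem aFind_shift (val x : Int) (t : List Int) (ns : List Nat) :
    aFind val (x :: t) [] (ns.map (fun k : Nat => (1 : Int) + (k : Int))) =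
      (aFind val t [] (ns.map (fun k : Nat => (0 : Int) + (k : Int)))).map (· + 1) := by
  induction ns with
  | nil => rfl
  | cons k ns ih =>
      rw [List.map_cons, List.map_cons, aFind, aFind]
      have h1 : PySem.List.pyGet? (x :: t) ((1 : Int) + (k : Int)) = PySem.List.pyGet? t k := by
        rw [show (1 : Int) + (k : Int) = (k : Int) + 1 by ring, PySem.List.pyGet?_cons_succ]
      rw [h1, show ((0 : Int) + (k : Int)) = (k : Int) from by ring]
      split
      · simp [Int.add_comm]
      · exact ih

theorem aFind_findIdx (s : List Int) (val : Int) (hmem : val ∈ s) :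
    aFind val s [] (PySem.List.pyRange 0 s.length 1) = [(s.findIdx (· == val) : Int)] := by
  induction s with
  | nil => cases hmem
  | cons x t ih =>
      rw [PySem.List.pyRange_one_cons (by simp)]
      rw [aFind, PySem.List.pyGet?_zero_cons]
      by_cases hx : x = val
      · subst hx
        rw [if_pos rfl]
        simp [List.findIdx_cons]
      · have hvt : val ∈ t := by
          cases hmem with
          | head => exact absurd rfl hx
          | tail _ h => exact h
        rw [if_neg (by simp [hx])]
        have hT : (((x :: t).length : Int) - 1).toNat = t.length := by simp
        have hT0 : ((t.length : Int) - 0).toNat = t.length := by simp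
        have hr : PySem.List.pyRange (0 + 1) ((x :: t).length : Int) 1 =
            (List.range t.length).map (fun k : Nat => (1 : Int) + (k : Int)) := by
          rw [show (0 : Int) + 1 = 1 from by norm_num, PySem.List.pyRange_one, hT]
        have hr0 : PySem.List.pyRange 0 (t.length : Int) 1 =
            (List.range t.length).map (fun k : Nat => (0 : Int) + (k : Int)) := by
          rw [PySem.List.pyRange_one, hT0]
        rw [hr, aFind_shift, ← hr0, ih hvt]
        simp only [List.map_cons, List.map_nil, List.findIdx_cons]
        have : (x == val) = false := by simp [hx]
        rw [this]
        simp only [cond_false]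
        push_cast
        ring_nf

-- in a nondecreasing list containing v, the first index of v is the number of elements < v
theorem findIdx_sorted_eq_countP (s : List Int) (v : Int)
    (hs : s.Pairwise (· ≤ ·)) (hmem : v ∈ s) :
    (s.findIdx (· == v)) = s.countP (fun w => decide (w < v)) := by
  induction s with
  | nil => cases hmem
  | cons x t ih =>
      rcases List.pairwise_cons.mp hs with ⟨hx_le, ht⟩
      by_cases hx : x = v
      · subst hx
        have hcount : t.countP (fun w => decide (w < x)) = 0 := by
          rw [List.countP_eq_zero]
          intro w hw
          simp [not_lt.mpr (hx_le w hw)]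
        simp [List.findIdx_cons, List.countP_cons, hcount]
      · have hvt : v ∈ t := by
          cases hmem with
          | head => exact absurd rfl hx
          | tail _ h => exact h
        have hlt : x < v := lt_of_le_of_ne (hx_le v hvt) hx
        have hb : (x == v) = false := by simp [hx]
        rw [List.findIdx_cons, hb, List.countP_cons]
        simp only [cond_false, hlt, decide_true, if_true, ih ht hvt]

-- B's inner fold counts strictly smaller elements
theorem foldl_count (val : Int) (l : List Int) (c : Int) :
    l.foldl (fun c w => if w < val then c + 1 else c) c
      = c + (l.countP (fun w => decide (w < val)) : Int) := by
  induction l generalizing c with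
  | nil => simp
  | cons w t ih =>
      simp only [List.foldl_cons, List.countP_cons]
      by_cases hw : w < val
      · rw [if_pos hw, ih]; simp [hw]; ring
      · rw [if_neg hw, ih]; simp [hw]

theorem foldl_aFind (s : List Int) (R : List Int)
    (hR : R = PySem.List.pyRange 0 (s.length : Int) 1) :
    ∀ (l acc : List Int), (∀ v ∈ l, v ∈ s) →
      l.foldl (fun ranks val => aFind val s ranks R) acc =
        acc ++ l.map (fun val => ((s.findIdx (· == val)) : Int)) := by
  intro l
  induction l with
  | nil => intro acc _; simp
  | cons x t ih =>
      intro acc hmem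
      simp only [List.foldl_cons, List.map_cons]
      rw [ih _ (fun v hv => hmem v (List.mem_cons_of_mem _ hv))]
      rw [aFind_acc, hR, aFind_findIdx s x (hmem x (List.mem_cons_self))]
      simp

theorem foldl_append_count (vals : List Int) :
    ∀ (l acc : List Int),
      l.foldl (fun ranks val =>
        ranks ++ [vals.foldl (fun c w => if w < val then c + 1 else c) (0 : Int)]) acc
      = acc ++ l.map (fun val => ((vals.countP (fun w => decide (w < val))) : Int)) := by
  intro l
  induction l with
  | nil => intro acc; simp
  | cons x t ih =>
      intro acc
      simp only [List.foldl_cons, List.map_cons]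
      rw [ih, foldl_count]
      simp

-- ===== VERDICT (by name: the statement is the Claim_ definition above) =====
theorem get_ranks_spec : Claim_equal_get_ranks := by
  intro vals _
  unfold Spec_get_ranks get_ranks get_ranks_alt
  simp only []
  have hperm : (PySem.List.sorted vals (fun x => x) false).Perm vals :=
    PySem.List.sorted_perm vals (fun x => x) false
  rw [foldl_aFind (PySem.List.sorted vals (fun x => x) false) _
        (by rw [hperm.length_eq]) vals []
        (fun v hv => ((PySem.List.mem_sorted vals (fun x => x) false) v).mpr hv),
      foldl_append_count]
  rw [List.nil_append, List.nil_append]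
  apply List.map_congr_left
  intro v hv
  have hmem : v ∈ PySem.List.sorted vals (fun x => x) false :=
    ((PySem.List.mem_sorted vals (fun x => x) false) v).mpr hv
  have hpw : (PySem.List.sorted vals (fun x => x) false).Pairwise (· ≤ ·) :=
    PySem.List.sorted_pairwise vals (fun x => x)
  rw [findIdx_sorted_eq_countP _ v hpw hmem, hperm.countP_eq _]
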